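-- pv_equiv track=rewrite | github.com/antonywanjala/corporate_strategy | import_category6.py | get_categorized_lists
-- ===== SOURCE A (Python) =====
-- def get_categorized_lists(data_dict, category=None, type_value=None):
--     """
--     Extracts a desired list or all lists from the output of the import function.
--
--     Args:
--         data_dict: The dictionary returned by import_and_categorize_data.
--         category: The category string to filter by (optional).
--         type_value: The type string to filter by (optional).
--
--     Returns:
--         A list of lists matching the criteria, or a single list if a
--         specific category and type are provided.
--     """
--     extracted_lists = []
--
--     if category and type_value:
--         # If both category and type are specified, return a single list
--         key = (category, type_value)
--         if key in data_dict:
--             return [data_dict[key]]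
--         else:
--             return []  # Return an empty list if the combination is not found
--     elif category or type_value:
--         # If only category or type is specified, return all matching lists
--         for (cat, typ), values in data_dict.items():
--             if (category and cat == category) or (type_value and typ == type_value):
--                 extracted_lists.append(values)
--     else:
--         # If no filter is provided, return all lists
--         for values in data_dict.values():
--             extracted_lists.append(values)
--
--     return extracted_lists
-- ===== SOURCE B (Python) =====
-- def get_categorized_lists(data_dict, category=None, type_value=None):
--     # One uniform scan: a value is included when each provided (truthy) filter matches.
--     return [values for (cat, typ), values in data_dict.items()
--             if (not category or cat == category) and (not type_value or typ == type_value)]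
-- ===== Notes on version B (the rewrite author's own statement) =====
-- stated objective: simpler
-- what changed: Replaces A's three-way dispatch (dict-key lookup when both filters are given, a disjunction scan for one filter, a copy-all loop for none) by a single comprehension over items() guarded by one conjunctive predicate.
import Mathlib
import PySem

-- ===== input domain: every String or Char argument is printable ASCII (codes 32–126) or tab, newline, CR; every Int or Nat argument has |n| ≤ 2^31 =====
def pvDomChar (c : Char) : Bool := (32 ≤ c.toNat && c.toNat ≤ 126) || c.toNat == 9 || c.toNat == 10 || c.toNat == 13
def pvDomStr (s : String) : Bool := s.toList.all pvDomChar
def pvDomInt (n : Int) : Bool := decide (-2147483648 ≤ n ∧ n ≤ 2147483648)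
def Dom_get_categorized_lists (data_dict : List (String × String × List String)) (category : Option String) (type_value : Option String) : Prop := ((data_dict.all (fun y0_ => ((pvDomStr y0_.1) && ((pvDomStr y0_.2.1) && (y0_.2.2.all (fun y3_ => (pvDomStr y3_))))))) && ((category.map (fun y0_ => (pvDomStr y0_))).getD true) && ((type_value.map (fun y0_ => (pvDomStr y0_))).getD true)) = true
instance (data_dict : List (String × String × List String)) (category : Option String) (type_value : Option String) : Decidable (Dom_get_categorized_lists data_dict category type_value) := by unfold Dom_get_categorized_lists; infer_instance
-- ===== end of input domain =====

-- B replaces A's three-way dispatch (key lookup / disjunction scan / copy-all) by one uniform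
-- filtered scan; equivalence is proved for association lists with pairwise-distinct keys.


-- Python truthiness of an Optional[str]: None and "" are falsy.
def pvTruthy (o : Option String) : Bool :=
  match o with
  | none => false
  | some s => !(s == "")

-- ===== PORT A =====
def get_categorized_lists (data_dict : List (String × String × List String)) (category : Option String) (type_value : Option String) : List (List String) :=
  if pvTruthy category && pvTruthy type_value then
    -- key in data_dict / data_dict[key]: first (unique) matching entry
    match data_dict.find? (fun kv => kv.1 == category.getD "" && kv.2.1 == type_value.getD "") with
    | some kv => [kv.2.2]
    | none => []
  else if pvTruthy category || pvTruthy type_value then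
    data_dict.foldl (fun acc kv =>
      if (pvTruthy category && kv.1 == category.getD "") || (pvTruthy type_value && kv.2.1 == type_value.getD "") then
        acc ++ [kv.2.2]
      else acc) []
  else
    data_dict.foldl (fun acc kv => acc ++ [kv.2.2]) []

-- ===== PORT B =====
def get_categorized_lists_alt (data_dict : List (String × String × List String)) (category : Option String) (type_value : Option String) : List (List String) :=
  (data_dict.filter (fun kv =>
      (!pvTruthy category || kv.1 == category.getD "") &&
      (!pvTruthy type_value || kv.2.1 == type_value.getD ""))).map (fun kv => kv.2.2)

-- ===== PRECONDITION & SPEC =====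
-- Pre_ excludes association lists with duplicate (category, type) keys: a Python dict can never
-- contain them, so no behaviour of A is specified there.
def Pre_get_categorized_lists (data_dict : List (String × String × List String)) (category : Option String) (type_value : Option String) : Prop :=
  (data_dict.map (fun kv => (kv.1, kv.2.1))).Nodup
instance (data_dict : List (String × String × List String)) (category : Option String) (type_value : Option String) : Decidable (Pre_get_categorized_lists data_dict category type_value) := by unfold Pre_get_categorized_lists; infer_instance

def pvWitness_get_categorized_lists : (List (String × String × List String)) × Option String × Option String :=
  ([("a", "x", ["1", "2"]), ("b", "x", [])], some "a", none)

def Spec_get_categorized_lists (data_dict : List (String × String × List String)) (category : Option String) (type_value : Option String) (out : List (List String)) : Prop := out = get_categorized_lists_alt data_dict category type_value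
instance (data_dict : List (String × String × List String)) (category : Option String) (type_value : Option String) (out : List (List String)) : Decidable (Spec_get_categorized_lists data_dict category type_value out) := by unfold Spec_get_categorized_lists; infer_instance

-- ===== CLAIM (what is proved, stated in full; the proofs are below) =====
def Claim_equal_get_categorized_lists : Prop := ∀ (data_dict : List (String × String × List String)) (category : Option String) (type_value : Option String), Dom_get_categorized_lists data_dict category type_value → Pre_get_categorized_lists data_dict category type_value → Spec_get_categorized_lists data_dict category type_value (get_categorized_lists data_dict category type_value)

-- ===== LEMMAS AND PROOFS =====

-- Both filters truthy: with pairwise-distinct keys, first-match lookup = filter of all matches.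
lemma find_eq_filter_of_nodup (c t : String) (d : List (String × String × List String))
    (h : (d.map (fun kv => (kv.1, kv.2.1))).Nodup) :
    (match d.find? (fun kv => kv.1 == c && kv.2.1 == t) with
     | some kv => [kv.2.2]
     | none => ([] : List (List String))) =
    (d.filter (fun kv => kv.1 == c && kv.2.1 == t)).map (fun kv => kv.2.2) := by
  induction d with
  | nil => simp
  | cons kv rest ih =>
    simp only [List.map_cons, List.nodup_cons] at h
    by_cases hm : (kv.1 == c && kv.2.1 == t) = true
    · simp only [List.find?_cons, hm, List.filter_cons]
      have hkey : kv.1 = c ∧ kv.2.1 = t := by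
        simpa [Bool.and_eq_true, beq_iff_eq] using hm
      have hrest : rest.filter (fun kv => kv.1 == c && kv.2.1 == t) = [] := by
        rw [List.filter_eq_nil_iff]
        intro kv' hkv' hm'
        have hkey' : kv'.1 = c ∧ kv'.2.1 = t := by
          simpa [Bool.and_eq_true, beq_iff_eq] using hm'
        exact h.1 (by
          rw [hkey.1, hkey.2, ← hkey'.1, ← hkey'.2]
          exact List.mem_map_of_mem hkv')
      simp [hrest]
    · simp only [List.find?_cons, hm, List.filter_cons]
      simpa [hm] using ih h.2

-- ===== VERDICT (by name: the statement is the Claim_ definition above) =====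
theorem get_categorized_lists_spec : Claim_equal_get_categorized_lists := by
  intro d category type_value _ pre
  unfold Spec_get_categorized_lists get_categorized_lists get_categorized_lists_alt
  rcases hc : pvTruthy category with _ | _ <;> rcases ht : pvTruthy type_value with _ | _ <;>
    simp only [Bool.false_and, Bool.true_and, Bool.false_or, Bool.or_false, Bool.and_self,
      Bool.not_false, Bool.not_true, Bool.true_or, if_false, Bool.false_eq_true, if_pos]
  · -- both falsy: copy-all loop = unfiltered map
    rw [PySem.List.foldl_append_singleton_eq_map]
    simp
  · -- only type_value truthy
    rw [PySem.List.foldl_append_if]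
    simp
  · -- only category truthy
    rw [PySem.List.foldl_append_if]
    simp
  · -- both truthy: unique-key lookup = filter
    exact find_eq_filter_of_nodup _ _ d pre
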